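-- pv_equiv track=rewrite | github.com/sunggyeong/TC_HO | plot_results.py | _method_order
-- ===== SOURCE A (Python) =====
-- def _method_order(methods):
--     # 원하는 발표 순서 우선
--     preferred = [
--         "Reactive_SlotBest",
--         "Predicted_Diffusion",
--         "Predicted_Consistency",
--         "Learned_TC_Offline",
--         "Learned_TC_RTCorrected",
--         "Sustainable_DAG_NetworkX",
--     ]
--     rank = {m: i for i, m in enumerate(preferred)}
--     return sorted(methods, key=lambda x: rank.get(x, 999))
-- ===== SOURCE B (Python) =====
-- def _method_order(methods):
--     preferred = [
--         "Reactive_SlotBest",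
--         "Predicted_Diffusion",
--         "Predicted_Consistency",
--         "Learned_TC_Offline",
--         "Learned_TC_RTCorrected",
--         "Sustainable_DAG_NetworkX",
--     ]
--     # bucket pass instead of a sort: collect each preferred name's occurrences
--     # in preferred order, then append everything unknown in original order
--     out = [m for p in preferred for m in methods if m == p]
--     out += [m for m in methods if m not in preferred]
--     return out
-- ===== Notes on version B (the rewrite author's own statement) =====
-- stated objective: alternative
-- what changed: Replaces the stable rank-keyed sort (dict of ranks + sorted) by a bucket/partition pass: collect occurrences of each preferred name in preferred order, then append the non-preferred entries in original order, with no sorting at all.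
import Mathlib
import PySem

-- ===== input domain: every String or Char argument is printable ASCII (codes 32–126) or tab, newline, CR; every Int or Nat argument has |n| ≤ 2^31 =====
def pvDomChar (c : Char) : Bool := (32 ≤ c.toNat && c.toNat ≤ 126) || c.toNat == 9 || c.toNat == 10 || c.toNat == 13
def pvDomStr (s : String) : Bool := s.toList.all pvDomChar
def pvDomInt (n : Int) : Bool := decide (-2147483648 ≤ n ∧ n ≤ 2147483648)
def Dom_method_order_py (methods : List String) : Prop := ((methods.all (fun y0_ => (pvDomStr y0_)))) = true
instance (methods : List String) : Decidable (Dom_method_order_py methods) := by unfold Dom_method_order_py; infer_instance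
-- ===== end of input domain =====

-- B replaces A's rank-dict + stable sort by a bucket/partition pass (collect each
-- preferred name's occurrences in preferred order, then the rest in original order);
-- objective: alternative (no sort at all), same return value.

-- ===== PORT A =====
def method_order_py (methods : List String) : List String :=
  let preferred : List String := [
    "Reactive_SlotBest",
    "Predicted_Diffusion",
    "Predicted_Consistency",
    "Learned_TC_Offline",
    "Learned_TC_RTCorrected",
    "Sustainable_DAG_NetworkX"]
  let rank : PySem.Dict String Int :=
    (PySem.List.enumerate preferred 0).foldl (fun d p => d.insert p.2 p.1) PySem.Dict.empty
  PySem.List.sorted methods (fun x => rank.getD x 999) false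

-- ===== PORT B =====
def method_order_py_alt (methods : List String) : List String :=
  let preferred : List String := [
    "Reactive_SlotBest",
    "Predicted_Diffusion",
    "Predicted_Consistency",
    "Learned_TC_Offline",
    "Learned_TC_RTCorrected",
    "Sustainable_DAG_NetworkX"]
  (preferred.flatMap (fun p => methods.filter (fun m => m == p)))
    ++ methods.filter (fun m => !(preferred.contains m))

-- ===== PRECONDITION & SPEC =====
def Spec_method_order_py (methods : List String) (out : List String) : Prop := out = method_order_py_alt methods
instance (methods : List String) (out : List String) : Decidable (Spec_method_order_py methods out) := by unfold Spec_method_order_py; infer_instance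

-- ===== CLAIM (what is proved, stated in full; the proofs are below) =====
def Claim_equal_method_order_py : Prop := ∀ (methods : List String), Dom_method_order_py methods → Spec_method_order_py methods (method_order_py methods)

-- ===== LEMMAS AND PROOFS =====

-- A's key function, written as the concrete dict lookup the port performs
def pvKeyA : String → Int := fun x =>
  (((((((PySem.Dict.empty).insert "Reactive_SlotBest" (0:Int)).insert "Predicted_Diffusion" 1).insert
      "Predicted_Consistency" 2).insert "Learned_TC_Offline" 3).insert
      "Learned_TC_RTCorrected" 4).insert "Sustainable_DAG_NetworkX" 5).getD x 999

theorem method_order_py_eq_sorted (methods : List String) :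
    method_order_py methods = PySem.List.sorted methods pvKeyA false := rfl

theorem pvKeyA_eq (x : String) : pvKeyA x =
    if x = "Reactive_SlotBest" then 0 else if x = "Predicted_Diffusion" then 1
    else if x = "Predicted_Consistency" then 2 else if x = "Learned_TC_Offline" then 3
    else if x = "Learned_TC_RTCorrected" then 4 else if x = "Sustainable_DAG_NetworkX" then 5
    else 999 := by
  simp only [pvKeyA, PySem.Dict.getD_insert, PySem.Dict.getD_empty]
  split_ifs <;> simp_all

-- insertBy drops x exactly between the not-before prefix and the before suffix
theorem insertBy_middle {α : Type} (before : α → α → Bool) (x : α) (l1 l2 : List α)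
    (h1 : ∀ y ∈ l1, before x y = false) (h2 : ∀ y ∈ l2, before x y = true) :
    PySem.List.insertBy before x (l1 ++ l2) = l1 ++ x :: l2 := by
  induction l1 with
  | nil =>
    cases l2 with
    | nil => simp [PySem.List.insertBy]
    | cons y ys => simp [PySem.List.insertBy, h2 y (by simp)]
  | cons a l1 ih =>
    have ha : before x a = false := h1 a (by simp)
    simp only [List.cons_append, PySem.List.insertBy, ha]
    simp [ih (fun y hy => h1 y (by simp [hy]))]

-- a stable sort over a key whose values all lie in a strictly increasing list ks
-- is the concatenation of the key-buckets in the order of ks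
theorem sorted_eq_flatMap_filter {α : Type} (key : α → Int) (ks : List Int)
    (hks : ks.Pairwise (· < ·)) (xs : List α) (hcov : ∀ x ∈ xs, key x ∈ ks) :
    PySem.List.sorted xs key false = ks.flatMap (fun k => xs.filter (fun x => key x == k)) := by
  induction xs using List.reverseRecOn with
  | nil =>
    have h0 : PySem.List.sorted ([] : List α) key false = [] :=
      (PySem.List.sorted_eq_nil_iff ([] : List α) key false).mpr rfl
    simp [h0]
  | append_singleton xs x ih =>
    have hx : key x ∈ ks := hcov x (by simp)
    obtain ⟨a, b, rfl⟩ := List.append_of_mem hx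
    rw [PySem.List.sorted_eq_foldl_insertBy, List.foldl_append, List.foldl_cons, List.foldl_nil,
      ← PySem.List.sorted_eq_foldl_insertBy, ih (fun y hy => hcov y (by simp [hy]))]
    have hpa := (List.pairwise_append.mp hks).2.2
    have ha : ∀ k ∈ a, k < key x := fun k hk => hpa k hk (key x) (by simp)
    have hb : ∀ k ∈ b, key x < k := (List.pairwise_cons.mp (List.pairwise_append.mp hks).2.1).1
    set F : Int → List α := fun k => xs.filter (fun y => key y == k) with hF
    set F' : Int → List α := fun k => (xs ++ [x]).filter (fun y => key y == k) with hF'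
    have hFa : ∀ k ∈ a, F' k = F k := by
      intro k hk
      have : ¬ (key x == k) = true := by simpa using (ne_of_gt (ha k hk))
      simp [hF, hF', List.filter_append, this]
    have hFb : ∀ k ∈ b, F' k = F k := by
      intro k hk
      have : ¬ (key x == k) = true := by simpa using (ne_of_lt (hb k hk))
      simp [hF, hF', List.filter_append, this]
    have hFx : F' (key x) = F (key x) ++ [x] := by simp [hF, hF', List.filter_append]
    have hmemF : ∀ k y, y ∈ F k → key y = k := by
      intro k y hy
      have := List.of_mem_filter hy
      simpa using this
    rw [List.flatMap_append, List.flatMap_cons, List.flatMap_append, List.flatMap_cons]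
    have hca : a.flatMap F' = a.flatMap F := by
      simp only [List.flatMap]; exact congrArg _ (List.map_congr_left hFa)
    have hcb : b.flatMap F' = b.flatMap F := by
      simp only [List.flatMap]; exact congrArg _ (List.map_congr_left hFb)
    rw [hca, hcb, hFx]
    have heq : a.flatMap F ++ (F (key x) ++ b.flatMap F)
        = (a.flatMap F ++ F (key x)) ++ b.flatMap F := by simp [List.append_assoc]
    rw [heq, insertBy_middle]
    · simp [List.append_assoc]
    · intro y hy
      rcases List.mem_append.mp hy with hy | hy
      · obtain ⟨k, hk, hyk⟩ := List.mem_flatMap.mp hy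
        have := hmemF k y hyk
        simp [this]; exact le_of_lt (ha k hk)
      · have := hmemF (key x) y hy
        simp [this]
    · intro y hy
      obtain ⟨k, hk, hyk⟩ := List.mem_flatMap.mp hy
      have := hmemF k y hyk
      simp [this]; exact hb k hk

theorem pvBucket (xs : List String) (i : Int) (p : String)
    (hp : ∀ x : String, (pvKeyA x == i) = (x == p)) :
    xs.filter (fun x => pvKeyA x == i) = xs.filter (fun m => m == p) :=
  List.filter_congr (fun x _ => hp x)

theorem method_order_py_spec' (methods : List String) :
    method_order_py methods = method_order_py_alt methods := by
  rw [method_order_py_eq_sorted,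
    sorted_eq_flatMap_filter pvKeyA [0, 1, 2, 3, 4, 5, 999] (by decide) methods
      (by intro x _; rw [pvKeyA_eq]; split_ifs <;> decide)]
  simp only [List.flatMap_cons, List.flatMap_nil, List.append_nil]
  rw [pvBucket methods 0 "Reactive_SlotBest" (by intro x; rw [pvKeyA_eq]; split_ifs <;> simp_all),
    pvBucket methods 1 "Predicted_Diffusion" (by intro x; rw [pvKeyA_eq]; split_ifs <;> simp_all),
    pvBucket methods 2 "Predicted_Consistency" (by intro x; rw [pvKeyA_eq]; split_ifs <;> simp_all),
    pvBucket methods 3 "Learned_TC_Offline" (by intro x; rw [pvKeyA_eq]; split_ifs <;> simp_all),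
    pvBucket methods 4 "Learned_TC_RTCorrected" (by intro x; rw [pvKeyA_eq]; split_ifs <;> simp_all),
    pvBucket methods 5 "Sustainable_DAG_NetworkX" (by intro x; rw [pvKeyA_eq]; split_ifs <;> simp_all)]
  have h999 : methods.filter (fun x => pvKeyA x == (999:Int))
      = methods.filter (fun m => !(["Reactive_SlotBest", "Predicted_Diffusion",
          "Predicted_Consistency", "Learned_TC_Offline", "Learned_TC_RTCorrected",
          "Sustainable_DAG_NetworkX"] : List String).contains m) := by
    refine List.filter_congr (fun x _ => ?_)
    rw [pvKeyA_eq]; split_ifs <;> simp_all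
  rw [h999]
  simp [method_order_py_alt, List.flatMap_cons]

-- ===== VERDICT (by name: the statement is the Claim_ definition above) =====
theorem method_order_py_spec : Claim_equal_method_order_py := by
  intro methods _
  exact method_order_py_spec' methods
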